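-- pv_equiv track=rewrite | github.com/huht/PythonLibrary | IP.py | netmask_to_string
-- ===== SOURCE A (Python) =====
-- def netmask_to_string(netmask_num):
--     if isinstance(netmask_num, int):
--         if netmask_num <= 32:
--             netmask_array = [0 for i in range(32)]
--             for i in range(0, 32):
--                 if i < netmask_num:
--                     netmask_array[i] = '1'
--                 else:
--                     netmask_array[i] = '0'
--             netmask1 = netmask_array[:8]
--             netmask2 = netmask_array[8:16]
--             netmask3 = netmask_array[16:24]
--             netmask4 = netmask_array[24:32]
--             netmask = str(int(''.join(netmask1), 2)) + '.' + str(int(''.join(netmask2), 2)) + '.' + \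
--                       str(int(''.join(netmask3), 2)) + '.' + str(int(''.join(netmask4), 2))
--             return netmask
--     return None
-- ===== SOURCE B (Python) =====
-- def netmask_to_string(netmask_num):
--     if isinstance(netmask_num, int) and netmask_num <= 32:
--         ones = max(netmask_num, 0)
--         mask = 0xFFFFFFFF - (2 ** (32 - ones) - 1)
--         o1, r = divmod(mask, 2 ** 24)
--         o2, r = divmod(r, 2 ** 16)
--         o3, o4 = divmod(r, 2 ** 8)
--         return str(o1) + '.' + str(o2) + '.' + str(o3) + '.' + str(o4)
--     return None
-- ===== Notes on version B (the rewrite author's own statement) =====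
-- stated objective: simpler
-- what changed: replaces the 32-element per-bit character list, slicing and base-2 string parsing with direct integer arithmetic: build the 32-bit mask value in one expression and split it into the four octets with divmod
import Mathlib
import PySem

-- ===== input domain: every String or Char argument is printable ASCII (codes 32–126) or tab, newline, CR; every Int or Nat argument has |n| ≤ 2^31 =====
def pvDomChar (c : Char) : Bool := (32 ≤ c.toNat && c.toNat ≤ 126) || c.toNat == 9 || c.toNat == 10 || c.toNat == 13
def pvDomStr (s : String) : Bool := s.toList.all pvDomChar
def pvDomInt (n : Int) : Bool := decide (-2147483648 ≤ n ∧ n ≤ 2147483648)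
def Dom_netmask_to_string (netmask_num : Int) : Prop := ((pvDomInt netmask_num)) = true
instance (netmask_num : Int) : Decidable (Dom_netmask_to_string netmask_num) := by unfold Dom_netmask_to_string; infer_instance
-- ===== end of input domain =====

-- B replaces A's 32-element per-bit character list, slicing and base-2 parsing with
-- direct integer arithmetic (one mask value, divmod octet extraction): simpler.

-- ===== PORT A =====
-- int(''.join(cs), 2): exact for lists consisting of '0'/'1' characters, which is
-- all A ever parses (every slot of the array is assigned '1' or '0').
def pvParseBin (cs : List Char) : Int :=
  cs.foldl (fun acc c => 2 * acc + (if c = '1' then 1 else 0)) 0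

def netmask_to_string (netmask_num : Int) : Option String :=
  if netmask_num ≤ 32 then
    -- netmask_array = [0 for i in range(32)]; the int 0s are all overwritten below,
    -- so the list is typed List Char with a placeholder '0'.
    let init : List Char := List.replicate 32 '0'
    let arr := (PySem.List.pyRange 0 32 1).foldl
      (fun a i => PySem.List.pySetD a i (if i < netmask_num then '1' else '0')) init
    let m1 := PySem.List.slice arr none (some 8)
    let m2 := PySem.List.slice arr (some 8) (some 16)
    let m3 := PySem.List.slice arr (some 16) (some 24)
    let m4 := PySem.List.slice arr (some 24) (some 32)
    some (PySem.Int.toStr (pvParseBin m1) ++ "." ++ PySem.Int.toStr (pvParseBin m2) ++ "." ++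
          PySem.Int.toStr (pvParseBin m3) ++ "." ++ PySem.Int.toStr (pvParseBin m4))
  else none

-- ===== PORT B =====
def netmask_to_string_alt (netmask_num : Int) : Option String :=
  if netmask_num ≤ 32 then
    let ones := max netmask_num 0
    -- 2 ** (32 - ones): exponent is in [0, 32] here, so '.toNat' is exact.
    let mask : Int := 0xFFFFFFFF - (2 ^ (32 - ones).toNat - 1)
    -- divmod(x, d) with d > 0: exact as PySem floordiv/mod.
    let o1 := PySem.Int.floordiv mask (2 ^ 24)
    let r1 := PySem.Int.mod mask (2 ^ 24)
    let o2 := PySem.Int.floordiv r1 (2 ^ 16)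
    let r2 := PySem.Int.mod r1 (2 ^ 16)
    let o3 := PySem.Int.floordiv r2 (2 ^ 8)
    let o4 := PySem.Int.mod r2 (2 ^ 8)
    some (PySem.Int.toStr o1 ++ "." ++ PySem.Int.toStr o2 ++ "." ++
          PySem.Int.toStr o3 ++ "." ++ PySem.Int.toStr o4)
  else none

-- ===== PRECONDITION & SPEC =====
def Spec_netmask_to_string (netmask_num : Int) (out : Option String) : Prop := out = netmask_to_string_alt netmask_num
instance (netmask_num : Int) (out : Option String) : Decidable (Spec_netmask_to_string netmask_num out) := by unfold Spec_netmask_to_string; infer_instance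

-- ===== CLAIM (what is proved, stated in full; the proofs are below) =====
def Claim_equal_netmask_to_string : Prop := ∀ (netmask_num : Int), Dom_netmask_to_string netmask_num → Spec_netmask_to_string netmask_num (netmask_to_string netmask_num)

-- ===== LEMMAS AND PROOFS =====

-- For a nonpositive netmask A's bit condition i < netmask_num is false on the whole
-- range, so A computes the same value as at 0.
theorem pvA_nonpos (n : Int) (h : n ≤ 0) : netmask_to_string n = netmask_to_string 0 := by
  unfold netmask_to_string
  rw [if_pos (by omega : n ≤ 32), if_pos (by omega : (0:Int) ≤ 32)]
  have harr : (PySem.List.pyRange 0 32 1).foldl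
      (fun a i => PySem.List.pySetD a i (if i < n then '1' else '0')) (List.replicate 32 '0')
      = (PySem.List.pyRange 0 32 1).foldl
      (fun a i => PySem.List.pySetD a i (if i < (0:Int) then '1' else '0')) (List.replicate 32 '0') := by
    apply PySem.List.foldl_congr_mem
    intro acc x hx
    rw [PySem.List.mem_pyRange_one] at hx
    rw [if_neg (by omega), if_neg (by omega)]
  simp only [harr]

theorem pvB_nonpos (n : Int) (h : n ≤ 0) : netmask_to_string_alt n = netmask_to_string_alt 0 := by
  unfold netmask_to_string_alt
  rw [if_pos (by omega : n ≤ 32), if_pos (by omega : (0:Int) ≤ 32)]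
  rw [show max n 0 = 0 from by omega, show max (0:Int) 0 = 0 from by omega]

-- ===== VERDICT (by name: the statement is the Claim_ definition above) =====
set_option maxRecDepth 40000 in
theorem netmask_to_string_spec : Claim_equal_netmask_to_string := by
  intro n _
  unfold Spec_netmask_to_string
  by_cases h32 : n ≤ 32
  · by_cases h0 : n < 0
    · rw [pvA_nonpos n (by omega), pvB_nonpos n (by omega)]
      decide
    · have h0' : 0 ≤ n := by omega
      interval_cases n <;> decide
  · unfold netmask_to_string netmask_to_string_alt
    rw [if_neg h32, if_neg h32]
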